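-- pv_equiv track=rewrite | github.com/esallen-amzn/amazon-bedrock-agents-healthcare-lifesciences-customized | instrument-diagnosis-assistant/agent/agent_config/tools/component_recognition_tools.py | _create_type_index
-- ===== SOURCE A (Python) =====
-- from typing import Dict, List, Any, Optional, Set, Tuple
--
-- def _create_type_index(components: List[Dict]) -> Dict[str, List[str]]:
--     """Create index of components by type"""
--     index = {}
--     for comp in components:
--         comp_type = comp['component_type']
--         if comp_type not in index:
--             index[comp_type] = []
--         index[comp_type].append(comp['name'])
--     return index
-- ===== SOURCE B (Python) =====
-- def _create_type_index(components):
--     """Create index of components by type"""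
--     order = list(dict.fromkeys(c['component_type'] for c in components))
--     return {t: [c['name'] for c in components if c['component_type'] == t]
--             for t in order}
-- ===== Notes on version B (the rewrite author's own statement) =====
-- stated objective: alternative
-- what changed: B replaces A's incremental dict-building loop by a two-phase comprehension: dedup the types in first-occurrence order, then build the dict with one filtering comprehension per type.
import Mathlib
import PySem

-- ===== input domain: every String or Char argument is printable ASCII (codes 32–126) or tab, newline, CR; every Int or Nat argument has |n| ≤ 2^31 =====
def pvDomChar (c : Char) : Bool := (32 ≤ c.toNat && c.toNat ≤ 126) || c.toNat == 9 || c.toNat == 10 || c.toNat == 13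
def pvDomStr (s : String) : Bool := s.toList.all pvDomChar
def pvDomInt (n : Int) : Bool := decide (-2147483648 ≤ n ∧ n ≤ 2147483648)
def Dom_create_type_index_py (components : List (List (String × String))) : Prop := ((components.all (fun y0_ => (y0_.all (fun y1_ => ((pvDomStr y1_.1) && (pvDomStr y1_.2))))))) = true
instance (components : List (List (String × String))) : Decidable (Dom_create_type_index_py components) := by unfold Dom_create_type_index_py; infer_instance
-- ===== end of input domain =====

-- B groups names by type with a dedup-then-filter comprehension instead of A's incremental dict loop;
-- same return value (same key order, same per-key name order) on every input where A returns.

-- comp[k]: first-match association-list lookup; total stand-in (Pre_ guarantees the key is present,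
-- so the default is never the looked-up value on admitted inputs)
def pvGetKey (c : List (String × String)) (k : String) : String := (c.lookup k).getD ""

-- ===== PORT A =====
def create_type_index_py (components : List (List (String × String))) : List (String × List String) :=
  (components.foldl
    (fun (index : PySem.Dict String (List String)) comp =>
      let comp_type := pvGetKey comp "component_type"
      let index1 := if index.contains comp_type then index else index.insert comp_type ([] : List String)
      index1.insert comp_type (index1.getD comp_type [] ++ [pvGetKey comp "name"]))
    PySem.Dict.empty).items

-- ===== PORT B =====
def create_type_index_py_alt (components : List (List (String × String))) : List (String × List String) :=
  (PySem.List.dedup (components.map (fun c => pvGetKey c "component_type"))).map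
    (fun t => (t, (components.filter (fun c => pvGetKey c "component_type" == t)).map
                    (fun c => pvGetKey c "name")))

-- ===== PRECONDITION & SPEC =====
-- Pre_ excludes exactly the inputs on which the Python A raises KeyError: a component dict
-- missing the 'component_type' or 'name' key.
def Pre_create_type_index_py (components : List (List (String × String))) : Prop :=
  components.all (fun c => (c.lookup "component_type").isSome && (c.lookup "name").isSome) = true
instance (components : List (List (String × String))) : Decidable (Pre_create_type_index_py components) := by unfold Pre_create_type_index_py; infer_instance
def pvWitness_create_type_index_py : (List (List (String × String))) :=
  [[("component_type", "optics"), ("name", "lens")], [("component_type", "optics"), ("name", "mirror")]]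

def Spec_create_type_index_py (components : List (List (String × String))) (out : List (String × List String)) : Prop := out = create_type_index_py_alt components
instance (components : List (List (String × String))) (out : List (String × List String)) : Decidable (Spec_create_type_index_py components out) := by unfold Spec_create_type_index_py; infer_instance

-- ===== CLAIM (what is proved, stated in full; the proofs are below) =====
def Claim_equal_create_type_index_py : Prop := ∀ (components : List (List (String × String))), Dom_create_type_index_py components → Pre_create_type_index_py components → Spec_create_type_index_py components (create_type_index_py components)

-- ===== LEMMAS AND PROOFS =====

-- A's loop body equals a single Dict.modify (append the name under the type key)
lemma stepA_eq_modify (d : PySem.Dict String (List String)) (comp : List (String × String)) :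
    (let comp_type := pvGetKey comp "component_type"
     let index1 := if d.contains comp_type then d else d.insert comp_type ([] : List String)
     index1.insert comp_type (index1.getD comp_type [] ++ [pvGetKey comp "name"]))
    = d.modify (pvGetKey comp "component_type") [] (· ++ [pvGetKey comp "name"]) := by
  by_cases h : d.contains (pvGetKey comp "component_type") = true
  · simp [h, PySem.Dict.modify]
  · have h' : d.contains (pvGetKey comp "component_type") = false := by simpa using h
    simp [h, PySem.Dict.modify, PySem.Dict.getD_insert_self,
      PySem.Dict.insert_insert_self, PySem.Dict.getD_of_not_contains d ([] : List String) h']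

theorem create_type_index_py_spec : Claim_equal_create_type_index_py := by
  intro components _ _
  show create_type_index_py components = create_type_index_py_alt components
  unfold create_type_index_py create_type_index_py_alt
  -- rewrite A's fold into the canonical modify-fold over (type, name) pairs
  have hfold :
      components.foldl
        (fun (index : PySem.Dict String (List String)) comp =>
          let comp_type := pvGetKey comp "component_type"
          let index1 := if index.contains comp_type then index else index.insert comp_type ([] : List String)
          index1.insert comp_type (index1.getD comp_type [] ++ [pvGetKey comp "name"]))
        PySem.Dict.empty
      = (components.map (fun c => (pvGetKey c "component_type", pvGetKey c "name"))).foldl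
          (fun (d : PySem.Dict String (List String)) p => d.modify p.1 [] (· ++ [p.2]))
          PySem.Dict.empty := by
    rw [List.foldl_map]
    congr 1
    funext d c
    exact stepA_eq_modify d c
  rw [hfold]
  set l := components.map (fun c => (pvGetKey c "component_type", pvGetKey c "name")) with hl
  set D := l.foldl (fun (d : PySem.Dict String (List String)) p => d.modify p.1 [] (· ++ [p.2]))
            PySem.Dict.empty with hD
  have hnodup : D.keys.Nodup := by
    rw [hD]
    exact PySem.Dict.nodup_keys_foldl_modify_key l (fun p => p.1) [] (fun _ p => (· ++ [p.2]))
      PySem.Dict.empty (by simp [PySem.Dict.keys_empty])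
  have hkeys : D.keys = PySem.List.dedup (components.map (fun c => pvGetKey c "component_type")) := by
    rw [hD]
    rw [PySem.Dict.keys_foldl_modify_key]
    simp [hl, PySem.List.dedup, PySem.Set.update, PySem.Set.ofList, PySem.Dict.keys_empty,
      PySem.Set.empty, List.map_map]
    rfl
  have hget : ∀ t : String, D.getD t [] =
      (components.filter (fun c => pvGetKey c "component_type" == t)).map (fun c => pvGetKey c "name") := by
    intro t
    rw [hD, PySem.Dict.getD_foldl_modify_append, PySem.Dict.getD_empty]
    rw [hl, List.filter_map, List.map_map]
    rfl
  rw [PySem.Dict.items_eq_map_keys D hnodup ([] : List String), hkeys]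
  exact List.map_congr_left (fun t _ => by rw [hget t])
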